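-- pv_equiv track=rewrite | github.com/emarberg/schurp | keys.py | maximal_decreasing_factors
-- ===== SOURCE A (Python) =====
-- def maximal_decreasing_factors(w):
--     factors = [[]]
--     for a in w:
--         if len(factors[-1]) == 0 or factors[-1][-1] > a:
--             factors[-1].append(a)
--         else:
--             factors.append([a])
--     return tuple(tuple(a) for a in factors)
-- ===== SOURCE B (Python) =====
-- def maximal_decreasing_factors(w):
--     # Staged construction: find the cut positions (where a non-decrease starts
--     # a new factor) in one pass, then partition w by slicing at the boundaries.
--     n = len(w)
--     cuts = [i for i in range(1, n) if w[i - 1] <= w[i]]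
--     bounds = [0] + cuts + [n]
--     return tuple(tuple(w[s:e]) for s, e in zip(bounds, bounds[1:]))
-- ===== Notes on version B (the rewrite author's own statement) =====
-- stated objective: alternative
-- what changed: B first computes the list of cut indices (positions where w[i-1] <= w[i]) and then builds the factors by slicing w at those boundaries, instead of A's single loop that incrementally appends into a growing nested list of runs.
import Mathlib
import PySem

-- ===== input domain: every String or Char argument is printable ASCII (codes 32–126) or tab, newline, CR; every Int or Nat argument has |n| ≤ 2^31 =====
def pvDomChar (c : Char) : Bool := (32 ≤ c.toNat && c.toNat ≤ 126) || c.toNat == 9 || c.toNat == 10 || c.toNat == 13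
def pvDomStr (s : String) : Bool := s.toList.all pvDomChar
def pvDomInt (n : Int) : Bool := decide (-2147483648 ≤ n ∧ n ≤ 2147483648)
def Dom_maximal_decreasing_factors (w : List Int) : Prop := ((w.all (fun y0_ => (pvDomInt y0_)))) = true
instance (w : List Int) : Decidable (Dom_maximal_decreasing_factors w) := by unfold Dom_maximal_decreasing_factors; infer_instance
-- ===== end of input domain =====

-- B builds the factorization in stages (cut positions by a range filter, then slices at the
-- boundaries) instead of A's single loop growing a nested run list; return values proved equal.

-- ===== PORT A =====
-- One loop step of A: `factors` is always nonempty, `factors[-1]` is its last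
-- element (getLastD [] — the default is never taken) and `factors[-1][-1]` is
-- only read when that factor is nonempty (Python's short-circuit `or`),
-- so getLastD 0 is exact there.
def pvAStep (factors : List (List Int)) (a : Int) : List (List Int) :=
  if (factors.getLastD []) = [] ∨ (factors.getLastD []).getLastD 0 > a then
    factors.dropLast ++ [(factors.getLastD []) ++ [a]]
  else
    factors ++ [[a]]

def maximal_decreasing_factors (w : List Int) : List (List Int) :=
  w.foldl pvAStep [[]]

-- ===== PORT B =====
-- cuts = [i for i in range(1, n) if w[i-1] <= w[i]]; both indices are in range
-- for every i produced by the range, so pyGetD's default is never taken.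
def pvCuts (w : List Int) : List Int :=
  (PySem.List.pyRange 1 (w.length : Int) 1).filter
    (fun i => PySem.List.pyGetD w (i - 1) 0 ≤ PySem.List.pyGetD w i 0)

-- bounds = [0] + cuts + [n]; zip(bounds, bounds[1:]) pairs consecutive
-- boundaries; each factor is the slice w[s:e].
def maximal_decreasing_factors_alt (w : List Int) : List (List Int) :=
  let bounds : List Int := 0 :: (pvCuts w ++ [(w.length : Int)])
  (bounds.zip bounds.tail).map (fun p => PySem.List.slice w (some p.1) (some p.2))

-- ===== PRECONDITION & SPEC =====
def Spec_maximal_decreasing_factors (w : List Int) (out : List (List Int)) : Prop := out = maximal_decreasing_factors_alt w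
instance (w : List Int) (out : List (List Int)) : Decidable (Spec_maximal_decreasing_factors w out) := by unfold Spec_maximal_decreasing_factors; infer_instance

-- ===== CLAIM (what is proved, stated in full; the proofs are below) =====
def Claim_equal_maximal_decreasing_factors : Prop := ∀ (w : List Int), Dom_maximal_decreasing_factors w → Spec_maximal_decreasing_factors w (maximal_decreasing_factors w)

-- ===== LEMMAS AND PROOFS =====

-- Common reference point: the front-building one-step function both results reduce to.
def pvFStep (a : Int) (factors : List (List Int)) : List (List Int) :=
  match factors with
  | [] => [[a]]
  | f :: rest => if a > f.headD 0 then (a :: f) :: rest else [a] :: f :: rest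

---- A side (loop characterisation) ----

-- Current-factor form of A's loop: process the rest of the word with current
-- (last) factor f, finished factors fs fixed to the left.
def pvMerge (f : List Int) : List Int → List (List Int)
  | [] => [f]
  | a :: t =>
    if f = [] ∨ f.getLastD 0 > a then pvMerge (f ++ [a]) t else f :: pvMerge [a] t

theorem pvFoldl_merge (w : List Int) : ∀ (fs : List (List Int)) (f : List Int),
    List.foldl pvAStep (fs ++ [f]) w = fs ++ pvMerge f w := by
  induction w with
  | nil => intro fs f; simp [pvMerge]
  | cons a t ih =>
    intro fs f
    have hstep : pvAStep (fs ++ [f]) a =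
        if f = [] ∨ f.getLastD 0 > a then fs ++ [f ++ [a]] else (fs ++ [f]) ++ [[a]] := by
      simp [pvAStep]
    by_cases h : f = [] ∨ f.getLastD 0 > a
    · rw [List.foldl_cons, hstep, if_pos h, ih fs (f ++ [a])]
      conv_rhs => rw [pvMerge]
      rw [if_pos h]
    · rw [List.foldl_cons, hstep, if_neg h, ih (fs ++ [f]) [a]]
      conv_rhs => rw [pvMerge]
      rw [if_neg h]
      simp

-- The pvFStep fold over a nonempty word starts with a factor headed by the
-- word's first letter.
theorem pvF0_cons (a : Int) (t : List Int) :
    ∃ g gs, List.foldr pvFStep [] (a :: t) = g :: gs ∧ g.headD 0 = a := by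
  rw [List.foldr_cons]
  cases h : List.foldr pvFStep [] t with
  | nil => exact ⟨[a], [], rfl, rfl⟩
  | cons f rest =>
    by_cases hgt : a > f.headD 0
    · refine ⟨a :: f, rest, ?_, rfl⟩
      simp only [pvFStep]; rw [if_pos hgt]
    · refine ⟨[a], f :: rest, ?_, rfl⟩
      simp only [pvFStep]; rw [if_neg hgt]

-- Merging a nonempty current factor f into the rest of the word
-- either glues f onto the fold's first factor or prepends it.
theorem pvMerge_vs_F0 (w : List Int) : ∀ (f : List Int), f ≠ [] →
    pvMerge f w = match List.foldr pvFStep [] w with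
      | [] => [f]
      | g :: gs => if f.getLastD 0 > g.headD 0 then (f ++ g) :: gs else f :: g :: gs := by
  induction w with
  | nil => intro f _; simp [pvMerge]
  | cons a t ih =>
    intro f hf
    by_cases h : f.getLastD 0 > a
    · have h' : a < f.getLast?.getD 0 := by simpa using h
      rw [pvMerge, if_pos (Or.inr h), ih (f ++ [a]) (by simp)]
      cases hBt : List.foldr pvFStep [] t with
      | nil => simp [List.foldr_cons, hBt, pvFStep, h']
      | cons g gs =>
        by_cases hgt : a > g.headD 0
        · have hgt' : g.head?.getD 0 < a := by simpa using hgt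
          simp [List.foldr_cons, hBt, pvFStep, hgt', h']
        · have hgt' : ¬ g.head?.getD 0 < a := by simpa using hgt
          simp [List.foldr_cons, hBt, pvFStep, hgt', h']
    · have h' : ¬ a < f.getLast?.getD 0 := by simpa using h
      have hcond : ¬ (f = [] ∨ f.getLastD 0 > a) := by
        rintro (h1 | h2); exact hf h1; exact h h2
      rw [pvMerge, if_neg hcond, ih [a] (by simp)]
      cases hBt : List.foldr pvFStep [] t with
      | nil => simp [List.foldr_cons, hBt, pvFStep, h']
      | cons g gs =>
        by_cases hgt : a > g.headD 0
        · have hgt' : g.head?.getD 0 < a := by simpa using hgt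
          simp [List.foldr_cons, hBt, pvFStep, hgt', h']
        · have hgt' : ¬ g.head?.getD 0 < a := by simpa using hgt
          simp [List.foldr_cons, hBt, pvFStep, hgt', h']

theorem pvMerge_singleton (a : Int) (t : List Int) :
    pvMerge [a] t = List.foldr pvFStep [] (a :: t) := by
  rw [pvMerge_vs_F0 t [a] (by simp)]
  cases hBt : List.foldr pvFStep [] t with
  | nil => simp [List.foldr_cons, hBt, pvFStep]
  | cons g gs =>
    by_cases hgt : a > g.headD 0
    · have hgt' : g.head?.getD 0 < a := by simpa using hgt
      simp [List.foldr_cons, hBt, pvFStep, hgt']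
    · have hgt' : ¬ g.head?.getD 0 < a := by simpa using hgt
      simp [List.foldr_cons, hBt, pvFStep, hgt']

theorem pvA_denote (w : List Int) :
    maximal_decreasing_factors w = if w = [] then [[]] else List.foldr pvFStep [] w := by
  have h0 : maximal_decreasing_factors w = pvMerge [] w := by
    have := pvFoldl_merge w [] []
    simpa [maximal_decreasing_factors] using this
  cases w with
  | nil => simp [h0, pvMerge]
  | cons a t =>
    rw [h0, pvMerge, if_pos (Or.inl rfl)]
    simp only [List.nil_append, if_neg (List.cons_ne_nil a t)]
    exact pvMerge_singleton a t

---- B side ----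

theorem pvCuts_pos (w : List Int) : ∀ x ∈ pvCuts w, 1 ≤ x := by
  intro x hx
  have := List.mem_of_mem_filter hx
  exact (PySem.List.mem_pyRange_one.mp this).1

-- shift lemma for slices
theorem pvSlice_shift (a : Int) (t : List Int) (s e : Int) (hs : 0 ≤ s) (he : 0 ≤ e) :
    PySem.List.slice (a :: t) (some (s + 1)) (some (e + 1)) = PySem.List.slice t (some s) (some e) := by
  rw [PySem.List.slice_toNat _ (by omega) (by omega), PySem.List.slice_toNat _ hs he]
  have h1 : (s + 1).toNat = s.toNat + 1 := by omega
  have h2 : (e + 1).toNat = e.toNat + 1 := by omega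
  rw [h1, h2, List.drop_succ_cons]
  congr 1
  omega

-- the zip-pairs slicing map, shifted by one, drops the head element
theorem pvPairs_shift (a : Int) (t : List Int) :
    ∀ (l : List Int), (∀ x ∈ l, 0 ≤ x) →
    (((l.map (· + 1)).zip (l.map (· + 1)).tail).map
        (fun p => PySem.List.slice (a :: t) (some p.1) (some p.2)))
      = ((l.zip l.tail).map (fun p => PySem.List.slice t (some p.1) (some p.2))) := by
  intro l hl
  induction l with
  | nil => rfl
  | cons x xs ih =>
    cases xs with
    | nil => rfl
    | cons y ys =>
      simp only [List.map_cons, List.tail_cons, List.zip_cons_cons, List.map_cons,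
        List.cons.injEq] at *
      refine ⟨pvSlice_shift a t x y (hl x (by simp)) (hl y (by simp)), ?_⟩
      exact ih (fun z hz => hl z (List.mem_cons_of_mem _ hz))

-- pyGetD on a cons, at a positive index, reads the tail one position earlier
theorem pvGetD_cons (a d : Int) (xs : List Int) (i : Int) (h : 1 ≤ i) :
    PySem.List.pyGetD (a :: xs) i d = PySem.List.pyGetD xs (i - 1) d := by
  obtain ⟨m, rfl⟩ : ∃ m : Nat, i = (m : Int) + 1 := ⟨(i - 1).toNat, by omega⟩
  have h2 : (m : Int) + 1 - 1 = ((m : Nat) : Int) := by ring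
  rw [h2, PySem.List.pyGetD_natCast]
  have h1 : (m : Int) + 1 = ((m + 1 : Nat) : Int) := by push_cast; ring
  rw [h1, PySem.List.pyGetD_natCast]
  rfl

-- cuts recurrence
theorem pvCuts_cons (a b : Int) (t : List Int) :
    pvCuts (a :: b :: t) = (if a ≤ b then [1] else []) ++ (pvCuts (b :: t)).map (· + 1) := by
  unfold pvCuts
  have hlen : (((a :: b :: t).length : Nat) : Int) = ((t.length : Nat) : Int) + 2 := by
    push_cast [List.length]; ring
  have hlen' : (((b :: t).length : Nat) : Int) = ((t.length : Nat) : Int) + 1 := by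
    push_cast [List.length]; ring
  rw [hlen, hlen', PySem.List.pyRange_one_cons (by omega), List.filter_cons]
  have hr : PySem.List.pyRange (1 + 1) (((t.length : Nat) : Int) + 2) 1
      = (PySem.List.pyRange 1 (((t.length : Nat) : Int) + 1) 1).map (· + 1) := by
    rw [PySem.List.pyRange_one, PySem.List.pyRange_one, List.map_map]
    have he : (((t.length : Nat) : Int) + 2 - (1 + 1)).toNat
        = (((t.length : Nat) : Int) + 1 - 1).toNat := by omega
    rw [he]
    exact List.map_congr_left (fun k _ => by simp; ring)
  rw [hr, List.filter_map]
  have hfilter : List.filter ((fun i => decide (PySem.List.pyGetD (a :: b :: t) (i - 1) 0 ≤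
          PySem.List.pyGetD (a :: b :: t) i 0)) ∘ (· + 1))
        (PySem.List.pyRange 1 (((t.length : Nat) : Int) + 1) 1)
      = List.filter (fun i => decide (PySem.List.pyGetD (b :: t) (i - 1) 0 ≤
          PySem.List.pyGetD (b :: t) i 0))
        (PySem.List.pyRange 1 (((t.length : Nat) : Int) + 1) 1) := by
    apply List.filter_congr
    intro i hi
    have h1 : 1 ≤ i := (PySem.List.mem_pyRange_one.mp hi).1
    simp only [Function.comp_apply]
    rw [show i + 1 - 1 = i from by ring, pvGetD_cons a 0 (b :: t) i h1,
      pvGetD_cons a 0 (b :: t) (i + 1) (by omega),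
      show i + 1 - 1 = i from by ring]
  rw [hfilter]
  have hcond : PySem.List.pyGetD (a :: b :: t) (1 - 1) 0 = a := by
    norm_num [PySem.List.pyGetD_zero_cons]
  have hcond2 : PySem.List.pyGetD (a :: b :: t) 1 0 = b := by
    have : (1 : Int) = ((1 : Nat) : Int) := rfl
    rw [this, PySem.List.pyGetD_natCast]; rfl
  by_cases hab : a ≤ b
  · rw [if_pos (by rw [hcond, hcond2]; exact decide_eq_true hab), if_pos hab]
    rfl
  · rw [if_neg (by rw [hcond, hcond2]; simpa using hab), if_neg hab]
    simp

-- the pairs-slicing view of B: map slice over consecutive pairs of 0 :: l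
def pvB0 (xs : List Int) (l : List Int) : List (List Int) :=
  ((0 :: l).zip l).map (fun p => PySem.List.slice xs (some p.1) (some p.2))

theorem pvB0_eq (w : List Int) :
    maximal_decreasing_factors_alt w = pvB0 w (pvCuts w ++ [((w.length : Nat) : Int)]) := rfl

-- first slice of a cons word, one past the head
theorem pvSlice_head (a : Int) (t : List Int) (e : Int) (he : 0 ≤ e) :
    PySem.List.slice (a :: t) (some 0) (some (e + 1)) = a :: PySem.List.slice t (some 0) (some e) := by
  rw [PySem.List.slice_toNat _ (by omega) (by omega), PySem.List.slice_toNat _ (by omega) he]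
  have h1 : (e + 1).toNat = e.toNat + 1 := by omega
  simp [h1]

-- opening a new singleton factor: bounds 0 :: (0 :: L) shifted by one
theorem pvB0_new (a : Int) (t : List Int) (L : List Int) (hL : ∀ z ∈ L, 0 ≤ z) :
    pvB0 (a :: t) ((0 :: L).map (· + 1)) = [a] :: pvB0 t L := by
  unfold pvB0
  simp only [List.map_cons, List.zip_cons_cons, List.map_cons]
  have hhead : PySem.List.slice (a :: t) (some 0) (some (0 + 1)) = [a] := by
    rw [pvSlice_head a t 0 le_rfl, PySem.List.slice_toNat _ le_rfl le_rfl]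
    simp
  have htail := pvPairs_shift a t (0 :: L)
    (by intro z hz; rcases List.mem_cons.mp hz with h | h; omega; exact hL z h)
  simp only [List.map_cons, List.tail_cons] at htail
  exact congrArg₂ List.cons hhead htail

-- gluing a into the first factor: bounds (0 :: L) with L shifted by one
theorem pvB0_glue (a : Int) (t : List Int) (x : Int) (L₂ : List Int)
    (hx : 0 ≤ x) (hL : ∀ z ∈ L₂, 0 ≤ z) :
    pvB0 (a :: t) ((x :: L₂).map (· + 1))
      = (a :: (pvB0 t (x :: L₂)).headD []) :: (pvB0 t (x :: L₂)).tail := by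
  unfold pvB0
  simp only [List.map_cons, List.zip_cons_cons, List.map_cons, List.headD_cons, List.tail_cons]
  have htail := pvPairs_shift a t (x :: L₂)
    (by intro z hz; rcases List.mem_cons.mp hz with h | h; omega; exact hL z h)
  simp only [List.map_cons, List.tail_cons] at htail
  exact congrArg₂ List.cons (pvSlice_head a t x hx) htail

-- B's step recurrence, written through pvFStep
theorem pvB_foldr (w : List Int) :
    maximal_decreasing_factors_alt w = if w = [] then [[]] else List.foldr pvFStep [] w := by
  induction w with
  | nil => decide
  | cons a t ih =>
    rw [if_neg (List.cons_ne_nil a t)]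
    cases t with
    | nil =>
      show maximal_decreasing_factors_alt [a] = [[a]]
      rw [pvB0_eq]
      have hc : pvCuts [a] = [] := by
        unfold pvCuts
        rw [show ((([a] : List Int).length : Nat) : Int) = 1 from rfl,
          PySem.List.pyRange_one_eq_nil le_rfl]
        rfl
      rw [hc]
      unfold pvB0
      simp only [List.nil_append, List.zip_cons_cons, List.zip_nil_right, List.map_cons,
        List.map_nil]
      rw [show (((([a] : List Int).length : Nat)) : Int) = (0 : Int) + 1 from rfl,
        pvSlice_head a [] 0 le_rfl, PySem.List.slice_toNat _ le_rfl le_rfl]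
      simp
    | cons b t' =>
      rw [if_neg (List.cons_ne_nil b t')] at ih
      rw [List.foldr_cons]
      obtain ⟨g, gs, hgs, hghead⟩ := pvF0_cons b t'
      rw [pvB0_eq, pvCuts_cons]
      have hlen : ((((a :: b :: t').length : Nat)) : Int) = (((b :: t').length : Nat) : Int) + 1 := by
        push_cast [List.length]; ring
      have hLpos : ∀ z ∈ pvCuts (b :: t') ++ [(((b :: t').length : Nat) : Int)], 0 ≤ z := by
        intro z hz
        rcases List.mem_append.mp hz with h | h
        · exact le_trans (by omega) (pvCuts_pos _ z h)
        · simp at h; omega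
      by_cases hab : a ≤ b
      · rw [if_pos hab, hlen]
        have hb : (([1] ++ (pvCuts (b :: t')).map (· + 1)) ++ [(((b :: t').length : Nat) : Int) + 1])
            = ((0 :: (pvCuts (b :: t') ++ [(((b :: t').length : Nat) : Int)])).map (· + 1)) := by
          simp
        rw [hb, pvB0_new a (b :: t') _ hLpos, ← pvB0_eq, ih, hgs]
        show _ = pvFStep a (g :: gs)
        simp only [pvFStep, hghead]
        rw [if_neg (by omega)]
      · rw [if_neg hab, hlen, List.nil_append]
        have hball : (((pvCuts (b :: t')).map (· + 1)) ++ [(((b :: t').length : Nat) : Int) + 1])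
            = ((pvCuts (b :: t') ++ [(((b :: t').length : Nat) : Int)]).map (· + 1)) := by
          simp
        rw [hball]
        cases hcut : pvCuts (b :: t') with
        | nil =>
          rw [List.nil_append]
          rw [pvB0_glue a (b :: t') _ [] (by positivity) (by intro z hz; cases hz)]
          have hBt : maximal_decreasing_factors_alt (b :: t')
              = pvB0 (b :: t') ((((b :: t').length : Nat) : Int) :: []) := by
            rw [pvB0_eq, hcut, List.nil_append]
          rw [← hBt, ih, hgs]
          show _ = pvFStep a (g :: gs)
          simp only [pvFStep, hghead]
          rw [if_pos (by omega)]
          simp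
        | cons x xs =>
          have hx1 : 1 ≤ x := pvCuts_pos (b :: t') x (by rw [hcut]; simp)
          rw [List.cons_append]
          rw [pvB0_glue a (b :: t') x _ (by omega)
            (by intro z hz; apply hLpos; rw [hcut, List.cons_append]
                exact List.mem_cons_of_mem x hz)]
          have hBt : maximal_decreasing_factors_alt (b :: t')
              = pvB0 (b :: t') (x :: (xs ++ [(((b :: t').length : Nat) : Int)])) := by
            rw [pvB0_eq, hcut, List.cons_append]
          rw [← hBt, ih, hgs]
          show _ = pvFStep a (g :: gs)
          simp only [pvFStep, hghead]
          rw [if_pos (by omega)]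
          simp

-- ===== VERDICT (by name: the statement is the Claim_ definition above) =====
theorem maximal_decreasing_factors_spec : Claim_equal_maximal_decreasing_factors := by
  intro w _
  show maximal_decreasing_factors w = maximal_decreasing_factors_alt w
  rw [pvA_denote, pvB_foldr]
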